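-- pv_equiv track=rewrite | github.com/IntSPstudio/it8c | library/data.py | cad319492
-- ===== SOURCE A (Python) =====
-- def cad319492(array1_content):
-- 	array1_content = sorted(array1_content)
-- 	array1_width = len(array1_content)
-- 	point1 =""
-- 	for i in range(0,2):
-- 		if i == 1:
-- 			check_height = ypb
-- 			check_width =3
-- 			check_content = cbd325306(check_height,check_width,"")
-- 		ypb =0
-- 		for ypa in range(0, array1_width):
-- 			point2 = str(array1_content[ypa])
-- 			if point2 !="":
-- 				if point2 != point1:
-- 					if i == 1:
-- 						check_content[ypb][0] = str(ypb +1)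
-- 						check_content[ypb][2] = point2
-- 					ypb +=1
-- 				point1 = point2
-- 	for ypa in range(0,check_height):
-- 		check1 =0
-- 		point1 = str(check_content[ypa][2])
-- 		for ypb in range(0,array1_width):
-- 			point2 = str(array1_content[ypb])
-- 			if point1 == point2:
-- 				check1 +=1
-- 		check_content[ypa][1] = str(check1)
-- 	return check_content
--
-- def cbd325306(array_height,array_width,array_content):
-- 	return [[array_content for xp in range(array_width)] for yp in range(array_height)]
-- ===== SOURCE B (Python) =====
-- def cad319492(array1_content):
--     # Single linear pass over the sorted array grouping consecutive equal
--     # elements (two-pointer run scan) instead of A's repeated full rescans.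
--     arr = sorted(array1_content)
--     n = len(arr)
--     out = []
--     i = 0
--     while i < n:
--         j = i + 1
--         while j < n and arr[j] == arr[i]:
--             j += 1
--         out.append([str(len(out) + 1), str(j - i), str(arr[i])])
--         i = j
--     return out
-- ===== Notes on version B (the rewrite author's own statement) =====
-- stated objective: faster
-- what changed: Replaces A's two index-driven passes plus a per-distinct-value full rescan of the array with one linear two-pointer run scan over the sorted array that emits each distinct value with its run length directly.
-- intended difference: On nonempty lists whose elements are all equal, A's stale point1 carried over from its first pass suppresses the only group, so A returns [['', '0', '']], while B returns [['1', str(n), str(v)]], the intended index/count/value row for the single distinct value. — e.g. on cad319492([3, 3]): A returns [["", "0", ""]], B returns [["1", "2", "3"]]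
import Mathlib
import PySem

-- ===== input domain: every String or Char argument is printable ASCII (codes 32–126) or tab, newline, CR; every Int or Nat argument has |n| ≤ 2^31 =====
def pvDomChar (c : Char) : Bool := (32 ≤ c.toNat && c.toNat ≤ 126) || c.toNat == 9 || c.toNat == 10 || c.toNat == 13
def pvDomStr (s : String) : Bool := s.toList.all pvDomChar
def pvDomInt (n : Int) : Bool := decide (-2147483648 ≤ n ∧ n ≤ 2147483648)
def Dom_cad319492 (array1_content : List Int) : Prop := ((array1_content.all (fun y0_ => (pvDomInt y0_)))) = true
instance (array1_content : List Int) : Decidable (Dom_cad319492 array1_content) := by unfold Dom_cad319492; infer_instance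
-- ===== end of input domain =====

-- B replaces A's two index passes + per-distinct-value rescans with one linear run scan
-- over the sorted array (faster); equivalence is on the return value only.

-- ===== PORT A =====
def cbd325306 (array_height array_width : Int) (array_content : String) : List (List String) :=
  (PySem.List.pyRange 0 array_height 1).map (fun _yp =>
    (PySem.List.pyRange 0 array_width 1).map (fun _xp => array_content))

-- the shared body of the 'for ypa in range(0, array1_width)' loop; 'fill' is A's 'i == 1'.
-- check_content[ypb][...] = … is ported with List.modify/List.set (ypb is always in range
-- when the Python assignment runs, so no IndexError is reachable).
def pvBody (arr : List Int) (fill : Bool)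
    (st : String × Int × List (List String)) (ypa : Int) : String × Int × List (List String) :=
  let point1 := st.1
  let ypb := st.2.1
  let cc := st.2.2
  let point2 := PySem.Int.toStr (PySem.List.pyGetD arr ypa 0)
  if point2 ≠ "" then
    if point2 ≠ point1 then
      let cc' := if fill then
          cc.modify ypb.toNat (fun row => (row.set 0 (PySem.Int.toStr (ypb + 1))).set 2 point2)
        else cc
      (point2, ypb + 1, cc')
    else (point2, ypb, cc)
  else (point1, ypb, cc)

def cad319492 (array1_content : List Int) : List (List String) :=
  let arr := PySem.List.sorted array1_content (fun x => x) false
  let width := PySem.List.len arr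
  -- 'for i in range(0,2)' unrolled: pass i = 0 (check_content does not exist yet)
  let st0 := (PySem.List.pyRange 0 width 1).foldl (pvBody arr false) ("", 0, [])
  -- i = 1: check_height = ypb; check_content built; point1 carries over from pass 0
  let check_height := st0.2.1
  let check_content := cbd325306 check_height 3 ""
  let st1 := (PySem.List.pyRange 0 width 1).foldl (pvBody arr true) (st0.1, 0, check_content)
  -- final counting loop; 'str(check_content[ypa][2])' is str() of a str, i.e. the str itself
  (PySem.List.pyRange 0 check_height 1).foldl (fun cc ypa =>
    let point1 := PySem.List.pyGetD (PySem.List.pyGetD cc ypa ([] : List String)) 2 ""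
    let check1 := (PySem.List.pyRange 0 width 1).foldl (fun c ypb =>
      if point1 = PySem.Int.toStr (PySem.List.pyGetD arr ypb 0) then c + 1 else c) (0 : Int)
    cc.modify ypa.toNat (fun row => row.set 1 (PySem.Int.toStr check1))) st1.2.2

-- ===== PORT B =====
-- two-pointer run scan of Source B: j advances over the run of arr[i], one row per run
def pvRuns (xs : List Int) (k : Int) : List (List String) :=
  match xs with
  | [] => []
  | v :: rest =>
    [PySem.Int.toStr (k + 1),
     PySem.Int.toStr ((1 : Int) + (rest.takeWhile (fun x => x == v)).length),
     PySem.Int.toStr v] :: pvRuns (rest.dropWhile (fun x => x == v)) (k + 1)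
termination_by xs.length
decreasing_by
  simp only [List.length_cons]
  exact Nat.lt_succ_of_le (List.length_dropWhile_le _ _)

def cad319492_alt (array1_content : List Int) : List (List String) :=
  pvRuns (PySem.List.sorted array1_content (fun x => x) false) 0

-- ===== PRECONDITION & SPEC =====
-- On nonempty all-equal lists A's stale point1 from pass 0 suppresses the only group, so A
-- returns [['', '0', '']]; B returns [['1', str(n), str(v)]], the intended row.
def D_cad319492 (array1_content : List Int) : Prop :=
  array1_content ≠ [] ∧ ∀ x ∈ array1_content, x = array1_content.headI
instance (array1_content : List Int) : Decidable (D_cad319492 array1_content) := by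
  unfold D_cad319492; infer_instance

def Spec_cad319492 (array1_content : List Int) (out : List (List String)) : Prop :=
  ¬ D_cad319492 array1_content → out = cad319492_alt array1_content
instance (array1_content : List Int) (out : List (List String)) : Decidable (Spec_cad319492 array1_content out) := by
  unfold Spec_cad319492; infer_instance

def pvDiffWitness_cad319492 : List Int := [3, 3]
def pvDiffWitnessOut_cad319492 : (List (List String)) × (List (List String)) :=
  ([["", "0", ""]], [["1", "2", "3"]])

-- ===== CLAIM (what is proved, stated in full; the proofs are below) =====
def Claim_unchanged_cad319492 : Prop := ∀ (array1_content : List Int), Dom_cad319492 array1_content → Spec_cad319492 array1_content (cad319492 array1_content)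
def Claim_changed_cad319492 : Prop := Dom_cad319492 (pvDiffWitness_cad319492) ∧ D_cad319492 (pvDiffWitness_cad319492) ∧ cad319492 (pvDiffWitness_cad319492) = pvDiffWitnessOut_cad319492.1 ∧ cad319492_alt (pvDiffWitness_cad319492) = pvDiffWitnessOut_cad319492.2 ∧ pvDiffWitnessOut_cad319492.1 ≠ pvDiffWitnessOut_cad319492.2
def Claim_exact_cad319492 : Prop := ∀ (array1_content : List Int), Dom_cad319492 array1_content → D_cad319492 array1_content → cad319492 array1_content ≠ cad319492_alt array1_content

-- ===== LEMMAS AND PROOFS =====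



-- ===== decimal decoding: str() is injective on Int =====

def decStep (a : Nat) (c : Char) : Nat := 10 * a + (c.toNat - 48)

theorem tdc_decode : ∀ (f : Nat), ∀ n ≤ f, ∀ (ds : List Char) (a : Nat),
    ∃ k, 0 < k ∧ n < 10 ^ k ∧
      (Nat.toDigitsCore 10 (f + 1) n ds).foldl decStep a = ds.foldl decStep (a * 10 ^ k + n) := by
  intro f
  induction f with
  | zero =>
    intro n hn ds a
    interval_cases n
    refine ⟨1, by norm_num, by norm_num, ?_⟩
    show List.foldl decStep (decStep a (Nat.digitChar 0)) ds = _
    have h0 : (Nat.digitChar 0).toNat = 48 := rfl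
    rw [show decStep a (Nat.digitChar 0) = a * 10 ^ 1 + 0 from by simp [decStep, h0]; ring]
  | succ f ih =>
    intro n hn ds a
    by_cases h : n / 10 = 0
    · refine ⟨1, by norm_num, by omega, ?_⟩
      have hlt : n < 10 := by omega
      simp only [Nat.toDigitsCore, h]
      have h10 : n % 10 < 10 := Nat.mod_lt _ (by norm_num)
      have hd : (Nat.digitChar (n % 10)).toNat = 48 + n % 10 := by
        set m := n % 10 with hm
        interval_cases m <;> rfl
      have hnm : n % 10 = n := Nat.mod_eq_of_lt hlt
      show List.foldl decStep (decStep a (Nat.digitChar (n % 10))) ds = _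
      rw [show decStep a (Nat.digitChar (n % 10)) = a * 10 ^ 1 + n from by simp [decStep, hd]; omega]
    · have hn' : n / 10 ≤ f := by omega
      obtain ⟨k, hk, hlt, heq⟩ := ih (n / 10) hn' (Nat.digitChar (n % 10) :: ds) a
      refine ⟨k + 1, by omega, ?_, ?_⟩
      · have h10 : n % 10 < 10 := Nat.mod_lt _ (by norm_num)
        calc n = 10 * (n / 10) + n % 10 := by omega
          _ < 10 * 10 ^ k := by omega
          _ = 10 ^ (k + 1) := by ring
      · show (Nat.toDigitsCore 10 (f + 1 + 1) n ds).foldl decStep a = _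
        rw [show Nat.toDigitsCore 10 (f + 1 + 1) n ds
              = Nat.toDigitsCore 10 (f + 1) (n / 10) (Nat.digitChar (n % 10) :: ds) from by
            simp [Nat.toDigitsCore, h]]
        rw [heq]
        have h10 : n % 10 < 10 := Nat.mod_lt _ (by norm_num)
        have hd : (Nat.digitChar (n % 10)).toNat = 48 + n % 10 := by
          set m := n % 10 with hm
          interval_cases m <;> rfl
        show List.foldl decStep (decStep (a * 10 ^ k + n / 10) (Nat.digitChar (n % 10))) ds = _
        rw [show decStep (a * 10 ^ k + n / 10) (Nat.digitChar (n % 10)) = a * 10 ^ (k + 1) + n from by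
          simp [decStep, hd]; ring_nf; omega]

theorem toDigits10_decode (n : Nat) : (Nat.toDigits 10 n).foldl decStep 0 = n := by
  obtain ⟨k, _, _, h⟩ := tdc_decode n n le_rfl [] 0
  simpa [Nat.toDigits] using h

theorem toDigits10_inj {m n : Nat} (h : Nat.toDigits 10 m = Nat.toDigits 10 n) : m = n := by
  have := toDigits10_decode m
  rw [h, toDigits10_decode] at this
  omega

theorem tdc_digits : ∀ (f n : Nat) (ds : List Char) (c : Char),
    c ∈ Nat.toDigitsCore 10 f n ds → c ∈ ds ∨ (48 ≤ c.toNat ∧ c.toNat ≤ 57) := by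
  intro f
  induction f with
  | zero => intro n ds c hc; exact Or.inl hc
  | succ f ih =>
    intro n ds c hc
    have h10 : n % 10 < 10 := Nat.mod_lt _ (by norm_num)
    have hd : 48 ≤ (Nat.digitChar (n % 10)).toNat ∧ (Nat.digitChar (n % 10)).toNat ≤ 57 := by
      set m := n % 10 with hm
      interval_cases m <;> exact ⟨by decide, by decide⟩
    by_cases h : n / 10 = 0
    · simp only [Nat.toDigitsCore, h] at hc
      rcases List.mem_cons.mp hc with h' | h'
      · exact Or.inr (h' ▸ hd)
      · exact Or.inl h'
    · simp only [Nat.toDigitsCore, h, if_false] at hc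
      rcases ih (n / 10) (Nat.digitChar (n % 10) :: ds) c hc with h' | h'
      · rcases List.mem_cons.mp h' with h'' | h''
        · exact Or.inr (h'' ▸ hd)
        · exact Or.inl h''
      · exact Or.inr h'

theorem tdc_ne_nil : ∀ (f n : Nat) (ds : List Char), Nat.toDigitsCore 10 (f + 1) n ds ≠ [] := by
  intro f
  induction f with
  | zero =>
    intro n ds
    by_cases h : n / 10 = 0 <;> simp [Nat.toDigitsCore, h]
  | succ f ih =>
    intro n ds
    by_cases h : n / 10 = 0
    · simp [Nat.toDigitsCore, h]
    · simp only [Nat.toDigitsCore, h, if_false]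
      exact ih (n / 10) _

theorem toChars_ne_nil (n : Int) : PySem.Int.toChars n ≠ [] := by
  unfold PySem.Int.toChars
  split
  · simp
  · exact tdc_ne_nil _ _ _

theorem neg_ne_toDigits (m : Nat) (l : List Char) : '-' :: l ≠ Nat.toDigits 10 m := by
  intro h
  have : '-' ∈ Nat.toDigits 10 m := h ▸ List.mem_cons_self
  rcases tdc_digits _ _ _ _ this with h' | h'
  · exact absurd h' (List.not_mem_nil)
  · revert h'; decide

theorem toChars_inj {a b : Int} (h : PySem.Int.toChars a = PySem.Int.toChars b) : a = b := by
  unfold PySem.Int.toChars at h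
  by_cases ha : a < 0 <;> by_cases hb : b < 0
  · rw [if_pos ha, if_pos hb] at h
    have := toDigits10_inj (List.cons_injective h)
    omega
  · rw [if_pos ha, if_neg hb] at h
    exact absurd h (neg_ne_toDigits _ _)
  · rw [if_neg ha, if_pos hb] at h
    exact absurd h.symm (neg_ne_toDigits _ _)
  · rw [if_neg ha, if_neg hb] at h
    have := toDigits10_inj h
    omega

theorem toStr_inj {a b : Int} (h : PySem.Int.toStr a = PySem.Int.toStr b) : a = b := by
  apply toChars_inj
  rw [← PySem.Int.toList_toStr, ← PySem.Int.toList_toStr, h]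

theorem toStr_ne_empty (n : Int) : PySem.Int.toStr n ≠ "" := by
  intro h
  have : (PySem.Int.toStr n).toList = ("" : String).toList := by rw [h]
  rw [PySem.Int.toList_toStr] at this
  exact toChars_ne_nil n (by simpa using this)

-- ===== consecutive-run grouping of a sorted list =====

def grp : List Int → List (Int × Nat)
  | [] => []
  | v :: rest => (v, 1 + (rest.takeWhile (fun x => x == v)).length) :: grp (rest.dropWhile (fun x => x == v))
termination_by xs => xs.length
decreasing_by
  simp only [List.length_cons]
  exact Nat.lt_succ_of_le (List.length_dropWhile_le _ _)

def flatG (g : List (Int × Nat)) : List Int := g.flatMap (fun p => List.replicate p.2 p.1)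

theorem takeWhile_beq_replicate (v : Int) (l : List Int) :
    l.takeWhile (fun x => x == v) = List.replicate (l.takeWhile (fun x => x == v)).length v := by
  rw [List.eq_replicate_iff]
  exact ⟨rfl, fun b hb => by simpa using (List.mem_takeWhile_imp hb)⟩

theorem grp_flat : ∀ (xs : List Int), flatG (grp xs) = xs
  | [] => by simp [grp, flatG]
  | v :: rest => by
    rw [grp]
    have ih := grp_flat (rest.dropWhile (fun x => x == v))
    simp only [flatG, List.flatMap_cons] at ih ⊢
    rw [ih, Nat.add_comm 1, List.replicate_succ]
    simp only [List.cons_append, List.cons.injEq, true_and]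
    conv_rhs => rw [← List.takeWhile_append_dropWhile (p := fun x => x == v) (l := rest)]
    rw [← takeWhile_beq_replicate]
termination_by xs => xs.length
decreasing_by
  simp only [List.length_cons]
  exact Nat.lt_succ_of_le (List.length_dropWhile_le _ _)

theorem grp_pos : ∀ (xs : List Int), ∀ p ∈ grp xs, 1 ≤ p.2
  | [] => by simp [grp]
  | v :: rest => by
    rw [grp]
    intro p hp
    rcases List.mem_cons.mp hp with h | h
    · subst h; simp
    · exact grp_pos _ p h
termination_by xs => xs.length
decreasing_by
  simp only [List.length_cons]
  exact Nat.lt_succ_of_le (List.length_dropWhile_le _ _)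

theorem grp_mem : ∀ (xs : List Int), ∀ p ∈ grp xs, p.1 ∈ xs
  | [] => by simp [grp]
  | v :: rest => by
    rw [grp]
    intro p hp
    rcases List.mem_cons.mp hp with h | h
    · subst h; simp
    · exact List.mem_cons_of_mem _ ((rest.dropWhile_sublist _).mem (grp_mem _ p h))
termination_by xs => xs.length
decreasing_by
  simp only [List.length_cons]
  exact Nat.lt_succ_of_le (List.length_dropWhile_le _ _)

theorem sorted_dropWhile_gt (v : Int) (rest : List Int)
    (hs : rest.Pairwise (· ≤ ·)) (hge : ∀ x ∈ rest, v ≤ x) :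
    ∀ z ∈ rest.dropWhile (fun x => x == v), v < z := by
  induction rest with
  | nil => simp
  | cons x t ih =>
    by_cases hx : x = v
    · rw [List.dropWhile_cons_of_pos (by simpa using hx)]
      exact ih (List.Pairwise.sublist (List.sublist_cons_self _ _) hs)
        (fun y hy => hge y (List.mem_cons_of_mem _ hy))
    · rw [List.dropWhile_cons_of_neg (by simpa using hx)]
      intro z hz
      rcases List.mem_cons.mp hz with h | h
      · subst h
        exact lt_of_le_of_ne (hge z List.mem_cons_self) (fun e => hx e.symm)
      · have hxz : x ≤ z := (List.pairwise_cons.mp hs).1 z h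
        have : v < x := lt_of_le_of_ne (hge x List.mem_cons_self) (fun e => hx e.symm)
        omega

theorem grp_chain : ∀ (xs : List Int), xs.Pairwise (· ≤ ·) →
    (grp xs).Pairwise (fun p q => p.1 < q.1)
  | [] => by simp [grp]
  | v :: rest => by
    intro hs
    rw [grp]
    have hrest : rest.Pairwise (· ≤ ·) := (List.pairwise_cons.mp hs).2
    have hge : ∀ x ∈ rest, v ≤ x := (List.pairwise_cons.mp hs).1
    have hdw : ∀ z ∈ rest.dropWhile (fun x => x == v), v < z :=
      sorted_dropWhile_gt v rest hrest hge
    refine List.pairwise_cons.mpr ⟨?_, ?_⟩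
    · intro q hq
      exact hdw q.1 (grp_mem _ q hq)
    · exact grp_chain _ (List.Pairwise.sublist (rest.dropWhile_sublist _) hrest)
termination_by xs => xs.length
decreasing_by
  simp only [List.length_cons]
  exact Nat.lt_succ_of_le (List.length_dropWhile_le _ _)

theorem grp_count : ∀ (xs : List Int), xs.Pairwise (· ≤ ·) →
    ∀ p ∈ grp xs, xs.count p.1 = p.2
  | [] => by simp [grp]
  | v :: rest => by
    intro hs p hp
    have hrest : rest.Pairwise (· ≤ ·) := (List.pairwise_cons.mp hs).2
    have hge : ∀ x ∈ rest, v ≤ x := (List.pairwise_cons.mp hs).1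
    have hdw : ∀ z ∈ rest.dropWhile (fun x => x == v), v < z :=
      sorted_dropWhile_gt v rest hrest hge
    have hsplit : rest = rest.takeWhile (fun x => x == v) ++ rest.dropWhile (fun x => x == v) :=
      (List.takeWhile_append_dropWhile ..).symm
    rw [grp] at hp
    rcases List.mem_cons.mp hp with h | h
    · subst h
      simp only [List.count_cons_self]
      conv_lhs => rw [hsplit]
      rw [List.count_append]
      have h1 : (rest.takeWhile (fun x => x == v)).count v
          = (rest.takeWhile (fun x => x == v)).length := by
        conv_lhs => rw [takeWhile_beq_replicate v rest]
        rw [List.count_replicate_self]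
      have h2 : (rest.dropWhile (fun x => x == v)).count v = 0 := by
        rw [List.count_eq_zero]
        intro hv
        exact absurd rfl (ne_of_gt (hdw v hv))
      omega
    · have ihc := grp_count (rest.dropWhile (fun x => x == v))
        (List.Pairwise.sublist (rest.dropWhile_sublist _) hrest) p h
      have hpv : v < p.1 := hdw p.1 (grp_mem _ p h)
      rw [List.count_cons_of_ne (by omega)]
      conv_lhs => rw [hsplit]
      rw [List.count_append]
      have h1 : (rest.takeWhile (fun x => x == v)).count p.1 = 0 := by
        rw [List.count_eq_zero]
        intro hv
        have := List.mem_takeWhile_imp hv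
        simp only [beq_iff_eq] at this
        omega
      omega
termination_by xs => xs.length
decreasing_by
  simp only [List.length_cons]
  exact Nat.lt_succ_of_le (List.length_dropWhile_le _ _)

-- rows produced by B, over the group list
def rowsOf (k : Int) : List (Int × Nat) → List (List String)
  | [] => []
  | (v, c) :: g =>
    [PySem.Int.toStr (k + 1), PySem.Int.toStr (c : Int), PySem.Int.toStr v] :: rowsOf (k + 1) g

theorem pvRuns_eq_rowsOf : ∀ (xs : List Int) (k : Int), pvRuns xs k = rowsOf k (grp xs)
  | [] => by intro k; rw [pvRuns.eq_def, grp]; rfl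
  | v :: rest => by
    intro k
    rw [pvRuns.eq_def, grp]
    simp only [rowsOf]
    refine congrArg₂ _ ?_ (pvRuns_eq_rowsOf _ _)
    congr 2
    all_goals (push_cast; ring)
termination_by xs => xs.length
decreasing_by
  simp only [List.length_cons]
  exact Nat.lt_succ_of_le (List.length_dropWhile_le _ _)

-- ===== A's passes over the sorted array, characterised on the run decomposition =====

def stepA (fill : Bool) (st : String × Int × List (List String)) (x : Int) :
    String × Int × List (List String) :=
  let point1 := st.1
  let ypb := st.2.1
  let cc := st.2.2
  let point2 := PySem.Int.toStr x
  if point2 ≠ "" then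
    if point2 ≠ point1 then
      let cc' := if fill then
          cc.modify ypb.toNat (fun row => (row.set 0 (PySem.Int.toStr (ypb + 1))).set 2 point2)
        else cc
      (point2, ypb + 1, cc')
    else (point2, ypb, cc)
  else (point1, ypb, cc)

theorem pvBody_eq (arr : List Int) (fill : Bool) :
    pvBody arr fill = fun st ypa => stepA fill st (PySem.List.pyGetD arr ypa 0) := rfl

theorem run_same (fill : Bool) (v : Int) : ∀ (m : Nat) (y : Int) (cc : List (List String)),
    (List.replicate m v).foldl (stepA fill) (PySem.Int.toStr v, y, cc)
      = (PySem.Int.toStr v, y, cc) := by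
  intro m
  induction m with
  | zero => intro y cc; rfl
  | succ m ih =>
    intro y cc
    rw [List.replicate_succ, List.foldl_cons]
    rw [show stepA fill (PySem.Int.toStr v, y, cc) v = (PySem.Int.toStr v, y, cc) from by
      simp [stepA, toStr_ne_empty]]
    exact ih y cc

def fillsC (fill : Bool) : List (Int × Nat) → Int → List (List String) → List (List String)
  | [], _, cc => cc
  | (v, _) :: g, y, cc =>
    fillsC fill g (y + 1)
      (if fill then
        cc.modify y.toNat (fun row => (row.set 0 (PySem.Int.toStr (y + 1))).set 2 (PySem.Int.toStr v))
      else cc)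

def lastS (g : List (Int × Nat)) (p1 : String) : String :=
  match g.getLast? with
  | none => p1
  | some p => PySem.Int.toStr p.1

theorem fillsC_false : ∀ (g : List (Int × Nat)) (y : Int) (cc : List (List String)),
    fillsC false g y cc = cc
  | [], _, _ => rfl
  | (_, _) :: g, y, cc => by
    rw [fillsC, if_neg (by simp)]
    exact fillsC_false g (y + 1) cc

theorem L_pass : ∀ (g : List (Int × Nat)) (fill : Bool) (p1 : String) (y : Int)
    (cc : List (List String)),
    (∀ p ∈ g, 1 ≤ p.2) → g.Pairwise (fun p q => p.1 < q.1) →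
    (∀ p, g.head? = some p → p1 ≠ PySem.Int.toStr p.1) →
    (flatG g).foldl (stepA fill) (p1, y, cc)
      = (lastS g p1, y + (g.length : Int), fillsC fill g y cc) := by
  intro g
  induction g with
  | nil => intro fill p1 y cc _ _ _; simp [flatG, lastS, fillsC]
  | cons p g' ih =>
    intro fill p1 y cc hpos hchain hhead
    obtain ⟨v, c⟩ := p
    have hc : 1 ≤ c := hpos (v, c) List.mem_cons_self
    have hflat : flatG ((v, c) :: g') = v :: (List.replicate (c - 1) v ++ flatG g') := by
      simp only [flatG, List.flatMap_cons]
      rw [show c = (c - 1) + 1 from by omega, List.replicate_succ]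
      simp
    rw [hflat, List.foldl_cons]
    have hstep1 : stepA fill (p1, y, cc) v
        = (PySem.Int.toStr v, y + 1,
           if fill then
             cc.modify y.toNat
               (fun row => (row.set 0 (PySem.Int.toStr (y + 1))).set 2 (PySem.Int.toStr v))
           else cc) := by
      have hne : PySem.Int.toStr v ≠ p1 := fun h => hhead (v, c) rfl h.symm
      simp [stepA, toStr_ne_empty, hne]
    rw [hstep1, List.foldl_append, run_same]
    have hchain' := (List.pairwise_cons.mp hchain).2
    have hlt := (List.pairwise_cons.mp hchain).1
    rw [ih fill (PySem.Int.toStr v) (y + 1) _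
      (fun q hq => hpos q (List.mem_cons_of_mem _ hq)) hchain'
      (fun q hq => by
        have hmem : q ∈ g' := List.mem_of_mem_head? hq
        intro heq
        exact absurd (toStr_inj heq) (ne_of_lt (hlt q hmem)))]
    refine congrArg₂ _ ?_ (congrArg₂ _ (by simp only [List.length_cons]; push_cast; ring) rfl)
    · cases g' with
      | nil => rfl
      | cons q g'' =>
        cases h : (q :: g'').getLast? with
        | none => simp at h
        | some r => simp [lastS, h]

theorem modify_append {α : Type} (pre : List α) (x : α) (t : List α) (f : α → α) :
    (pre ++ x :: t).modify pre.length f = pre ++ f x :: t := by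
  induction pre with
  | nil => simp [List.modify]
  | cons a p ih => simpa [List.modify] using ih

-- rows after pass i = 1 (middle column still empty)
def midRows (k : Int) : List (Int × Nat) → List (List String)
  | [] => []
  | (v, _) :: g => [PySem.Int.toStr (k + 1), "", PySem.Int.toStr v] :: midRows (k + 1) g

theorem midRows_length (g : List (Int × Nat)) : ∀ k, (midRows k g).length = g.length := by
  induction g with
  | nil => intro k; rfl
  | cons p g ih => intro k; obtain ⟨v, c⟩ := p; simp [midRows, ih]

theorem L_fills : ∀ (g : List (Int × Nat)) (pre : List (List String)),
    fillsC true g (pre.length : Int) (pre ++ List.replicate g.length ["", "", ""])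
      = pre ++ midRows (pre.length : Int) g := by
  intro g
  induction g with
  | nil => intro pre; simp [fillsC, midRows]
  | cons p g' ih =>
    intro pre
    obtain ⟨v, c⟩ := p
    rw [fillsC, if_pos rfl]
    rw [List.length_cons, List.replicate_succ]
    have htn : ((pre.length : Int)).toNat = pre.length := by simp
    rw [htn, modify_append]
    have hrow : ((["", "", ""].set 0 (PySem.Int.toStr ((pre.length : Int) + 1))).set 2
        (PySem.Int.toStr v)) = [PySem.Int.toStr ((pre.length : Int) + 1), "", PySem.Int.toStr v] := rfl
    rw [hrow]
    have hlen : ((pre ++ [[PySem.Int.toStr ((pre.length : Int) + 1), "", PySem.Int.toStr v]]).length : Int)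
        = (pre.length : Int) + 1 := by simp
    have := ih (pre ++ [[PySem.Int.toStr ((pre.length : Int) + 1), "", PySem.Int.toStr v]])
    rw [hlen] at this
    rw [show pre ++ [PySem.Int.toStr ((pre.length : Int) + 1), "", PySem.Int.toStr v]
          :: List.replicate g'.length ["", "", ""]
        = (pre ++ [[PySem.Int.toStr ((pre.length : Int) + 1), "", PySem.Int.toStr v]])
          ++ List.replicate g'.length ["", "", ""] from by simp]
    rw [this]
    simp [midRows]

-- the final counting loop
def cnt (arr : List Int) (width : Int) (p1 : String) : Int :=
  (PySem.List.pyRange 0 width 1).foldl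
    (fun c ypb => if p1 = PySem.Int.toStr (PySem.List.pyGetD arr ypb 0) then c + 1 else c) (0 : Int)

def gRow (arr : List Int) (width : Int) (row : List String) : List String :=
  row.set 1 (PySem.Int.toStr (cnt arr width (PySem.List.pyGetD row 2 "")))

def cntBody (arr : List Int) (width : Int) (cc : List (List String)) (ypa : Int) :
    List (List String) :=
  cc.modify ypa.toNat (fun row => row.set 1 (PySem.Int.toStr
    (cnt arr width (PySem.List.pyGetD (PySem.List.pyGetD cc ypa ([] : List String)) 2 ""))))

theorem L_cnt (arr : List Int) (width : Int) :
    ∀ (rows pre : List (List String)),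
    (PySem.List.pyRange (pre.length : Int) ((pre.length : Int) + rows.length) 1).foldl
        (cntBody arr width) (pre ++ rows)
      = pre ++ rows.map (gRow arr width) := by
  intro rows
  induction rows with
  | nil => intro pre; simp [PySem.List.pyRange_one_eq_nil]
  | cons r rs ih =>
    intro pre
    rw [PySem.List.pyRange_one_cons (by
      have : (0 : Int) < ((r :: rs).length : Int) := by
        simp only [List.length_cons]
        push_cast
        omega
      omega)]
    rw [List.foldl_cons]
    have hget : PySem.List.pyGetD (pre ++ r :: rs) (pre.length : Int) ([] : List String) = r := by
      rw [PySem.List.pyGetD_natCast]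
      simp [List.getD, List.getElem?_append_right]
    have hbody : cntBody arr width (pre ++ r :: rs) (pre.length : Int)
        = pre ++ gRow arr width r :: rs := by
      unfold cntBody
      rw [hget]
      have htn : ((pre.length : Int)).toNat = pre.length := by simp
      rw [htn, modify_append]
      rfl
    rw [hbody]
    have hpre1 : ((pre ++ [gRow arr width r]).length : Int) = (pre.length : Int) + 1 := by simp
    have := ih (pre ++ [gRow arr width r])
    rw [hpre1] at this
    rw [show (pre.length : Int) + 1 + (rs.length : Int) = (pre.length : Int) + ((r :: rs).length : Int) from by
      simp; ring] at this
    simpa using this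

theorem cnt_eval (arr : List Int) (v : Int) :
    cnt arr ((arr.length : Int)) (PySem.Int.toStr v) = (arr.count v : Int) := by
  unfold cnt
  rw [PySem.List.foldl_pyRange_zero_pyGetD' arr 0
    (fun c x => if PySem.Int.toStr v = PySem.Int.toStr x then c + 1 else c) 0]
  rw [PySem.List.foldl_ite_add_one (p := fun x => PySem.Int.toStr v = PySem.Int.toStr x)]
  rw [show arr.countP (fun x => decide (PySem.Int.toStr v = PySem.Int.toStr x)) = arr.count v from by
    rw [List.count]
    apply List.countP_congr
    intro x _
    simp only [decide_eq_true_eq, beq_iff_eq]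
    constructor
    · intro h; exact (toStr_inj h).symm
    · intro h; rw [h]]
  simp

theorem cnt_empty (arr : List Int) : cnt arr ((arr.length : Int)) "" = 0 := by
  unfold cnt
  rw [PySem.List.foldl_pyRange_zero_pyGetD' arr 0
    (fun c x => if "" = PySem.Int.toStr x then c + 1 else c) 0]
  rw [PySem.List.foldl_ite_add_one (p := fun x => "" = PySem.Int.toStr x)]
  rw [show arr.countP (fun x => decide ("" = PySem.Int.toStr x)) = 0 from by
    rw [List.countP_eq_zero]
    intro x _
    simp only [decide_eq_true_eq]
    exact fun h => toStr_ne_empty x h.symm]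
  simp

theorem map_gRow_midRows (arr : List Int) :
    ∀ (g : List (Int × Nat)) (k : Int),
    (∀ p ∈ g, cnt arr ((arr.length : Int)) (PySem.Int.toStr p.1) = (p.2 : Int)) →
    (midRows k g).map (gRow arr ((arr.length : Int))) = rowsOf k g := by
  intro g
  induction g with
  | nil => intro k _; rfl
  | cons p g' ih =>
    intro k hcnt
    obtain ⟨v, c⟩ := p
    simp only [midRows, rowsOf, List.map_cons]
    refine congrArg₂ _ ?_ ?_
    · unfold gRow
      rw [show PySem.List.pyGetD [PySem.Int.toStr (k + 1), "", PySem.Int.toStr v] (2 : Int) "" = PySem.Int.toStr v from rfl]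
      rw [hcnt (v, c) List.mem_cons_self]
      rfl
    · exact ih (k + 1) (fun q hq => hcnt q (List.mem_cons_of_mem _ hq))

theorem cbd_eval (n : Nat) :
    cbd325306 ((n : Int)) 3 "" = List.replicate n ["", "", ""] := by
  unfold cbd325306
  rw [show ((PySem.List.pyRange 0 3 1).map (fun _ => ("" : String))) = ["", "", ""] from rfl]
  rw [List.map_const']
  congr 1
  rw [PySem.List.length_pyRange_one]
  simp

theorem pass_on_sorted (s : List Int) (hsP : s.Pairwise (· ≤ ·)) (fill : Bool) (p1 : String)
    (y : Int) (cc : List (List String))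
    (hhead : ∀ p, (grp s).head? = some p → p1 ≠ PySem.Int.toStr p.1) :
    s.foldl (stepA fill) (p1, y, cc)
      = (lastS (grp s) p1, y + ((grp s).length : Int), fillsC fill (grp s) y cc) := by
  conv_lhs => rw [← grp_flat s]
  exact L_pass (grp s) fill p1 y cc (grp_pos s) (grp_chain s hsP) hhead

theorem lastS_ne_head (g : List (Int × Nat)) (hchain : g.Pairwise (fun p q => p.1 < q.1))
    (h2 : 2 ≤ g.length) :
    ∀ p, g.head? = some p → lastS g "" ≠ PySem.Int.toStr p.1 := by
  intro p hp
  rcases g with _ | ⟨p0, g'⟩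
  · simp at hp
  rcases g' with _ | ⟨q, rest⟩
  · simp at h2
  have hpp : p0 = p := by simpa using hp
  subst hpp
  cases hlast : (q :: rest).getLast? with
  | none => simp at hlast
  | some r =>
    have hrmem : r ∈ q :: rest := List.mem_of_getLast? hlast
    have hlt : p0.1 < r.1 := (List.pairwise_cons.mp hchain).1 r hrmem
    have : lastS (p0 :: q :: rest) "" = PySem.Int.toStr r.1 := by
      simp [lastS, List.getLast?_cons_cons, hlast]
    rw [this]
    intro h
    exact absurd (toStr_inj h) (ne_of_gt hlt)

theorem fills0 (g : List (Int × Nat)) :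
    fillsC true g 0 (List.replicate g.length ["", "", ""]) = midRows 0 g := by
  simpa using L_fills g []

theorem cnt0 (arr : List Int) (width : Int) (rows : List (List String)) :
    (PySem.List.pyRange 0 ((rows.length : Int)) 1).foldl (cntBody arr width) rows
      = rows.map (gRow arr width) := by
  simpa using L_cnt arr width rows []

-- the two programs agree outside the all-equal corner
theorem main_eq (l : List Int) (hD : ¬ D_cad319492 l) :
    cad319492 l = cad319492_alt l := by
  by_cases hnil : l = []
  · subst hnil
    rw [show cad319492 [] = [] from rfl]
    rw [cad319492_alt, show PySem.List.sorted ([] : List Int) (fun x => x) false = [] from rfl,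
      pvRuns.eq_def]
  · unfold cad319492 cad319492_alt
    have hsP : (PySem.List.sorted l (fun x => x) false).Pairwise (· ≤ ·) :=
      PySem.List.sorted_pairwise (xs := l) (key := fun x => x)
    have hperm : (PySem.List.sorted l (fun x => x) false).Perm l :=
      PySem.List.sorted_perm l (fun x => x) false
    generalize hsg : PySem.List.sorted l (fun x => x) false = s at *
    have hsne : s ≠ [] := by
      intro h
      rw [h] at hperm
      exact hnil (List.Perm.nil_eq hperm).symm
    have hchain := grp_chain s hsP
    have hgne : grp s ≠ [] := by
      intro h
      have := grp_flat s
      rw [h] at this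
      exact hsne (by simpa [flatG] using this.symm)
    have hg2 : 2 ≤ (grp s).length := by
      rcases hg : grp s with _ | ⟨p, g'⟩
      · exact absurd hg hgne
      rcases g' with _ | ⟨q, g''⟩
      · exfalso
        apply hD
        have hflat := grp_flat s
        rw [hg] at hflat
        simp only [flatG, List.flatMap_cons, List.flatMap_nil, List.append_nil] at hflat
        have hallv : ∀ x ∈ l, x = p.1 := by
          intro x hx
          have : x ∈ s := (hperm.mem_iff).mpr hx -- s.Perm l : mem_iff : a ∈ s ↔ a ∈ l
          rw [← hflat] at this
          exact List.eq_of_mem_replicate this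
        have hhead : l.headI ∈ l := by
          cases hl : l with
          | nil => exact absurd hl hnil
          | cons a t => rw [← hl]; rw [hl]; exact List.mem_cons_self
        refine ⟨hnil, fun x hx => ?_⟩
        rw [hallv x hx, hallv l.headI hhead]
      · simp
    dsimp only
    rw [pvBody_eq, pvBody_eq]
    simp only [PySem.List.len_eq]
    rw [PySem.List.foldl_pyRange_zero_pyGetD' s 0 (stepA false) ("", 0, ([] : List (List String)))]
    rw [pass_on_sorted s hsP false "" 0 []
      (fun p hp => fun h => toStr_ne_empty p.1 h.symm)]
    simp only [zero_add]
    rw [cbd_eval (grp s).length]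
    rw [PySem.List.foldl_pyRange_zero_pyGetD' s 0 (stepA true) _]
    rw [pass_on_sorted s hsP true (lastS (grp s) "") 0 _ (lastS_ne_head (grp s) hchain hg2)]
    simp only [zero_add]
    rw [fills0 (grp s)]
    rw [show (fun (cc : List (List String)) (ypa : Int) =>
        cc.modify ypa.toNat (fun row => row.set 1 (PySem.Int.toStr
          ((PySem.List.pyRange 0 ((s.length : Int)) 1).foldl
            (fun c ypb => if PySem.List.pyGetD (PySem.List.pyGetD cc ypa ([] : List String)) 2 ""
                = PySem.Int.toStr (PySem.List.pyGetD s ypb 0) then c + 1 else c) (0 : Int)))))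
      = cntBody s ((s.length : Int)) from rfl]
    rw [show ((grp s).length : Int) = (((midRows 0 (grp s)).length : Nat) : Int) from by
      rw [midRows_length]]
    rw [cnt0 s ((s.length : Int)) (midRows 0 (grp s))]
    rw [map_gRow_midRows s (grp s) 0 (fun p hp => by
      rw [cnt_eval s p.1, grp_count s hsP p hp])]
    rw [pvRuns_eq_rowsOf]

-- ===== the all-equal corner: A differs from B everywhere inside D_ =====

theorem grp_replicate (v : Int) (n : Nat) (h : 1 ≤ n) :
    grp (List.replicate n v) = [(v, n)] := by
  rw [show n = (n - 1) + 1 from by omega, List.replicate_succ, grp]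
  rw [show (List.replicate (n - 1) v).takeWhile (fun x => x == v) = List.replicate (n - 1) v from by
    rw [List.takeWhile_eq_self_iff]; intro x hx; simp [List.eq_of_mem_replicate hx]]
  rw [show (List.replicate (n - 1) v).dropWhile (fun x => x == v) = [] from by
    rw [List.dropWhile_eq_nil_iff]; intro x hx; simp [List.eq_of_mem_replicate hx]]
  rw [grp]
  simp [Nat.add_comm]

theorem main_ne (l : List Int) (hD : D_cad319492 l) :
    cad319492 l ≠ cad319492_alt l := by
  obtain ⟨hnil, hall⟩ := hD
  have hperm : (PySem.List.sorted l (fun x => x) false).Perm l :=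
    PySem.List.sorted_perm l (fun x => x) false
  unfold cad319492 cad319492_alt
  generalize hsg : PySem.List.sorted l (fun x => x) false = s at *
  have hn1 : 1 ≤ l.length := by
    cases l with
    | nil => exact absurd rfl hnil
    | cons a t => simp
  have hsrep : s = List.replicate l.length l.headI := by
    rw [List.eq_replicate_iff]
    exact ⟨hperm.length_eq, fun b hb => hall b (hperm.mem_iff.mp hb)⟩
  rw [hsrep]
  have hsP : (List.replicate l.length l.headI).Pairwise (· ≤ ·) := by
    apply List.pairwise_replicate.mpr
    right; exact le_rfl
  have hgrp : grp (List.replicate l.length l.headI) = [(l.headI, l.length)] :=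
    grp_replicate _ _ hn1
  dsimp only
  rw [pvBody_eq, pvBody_eq]
  simp only [PySem.List.len_eq]
  rw [PySem.List.foldl_pyRange_zero_pyGetD' (List.replicate l.length l.headI) 0 (stepA false)
    ("", 0, ([] : List (List String)))]
  rw [pass_on_sorted _ hsP false "" 0 [] (fun p hp => fun h => toStr_ne_empty p.1 h.symm)]
  rw [hgrp]
  simp only [zero_add, lastS, List.getLast?_cons, List.getLast?_nil, List.length_cons,
    List.length_nil]
  simp only [Option.getD]
  rw [cbd_eval 1]
  rw [PySem.List.foldl_pyRange_zero_pyGetD' (List.replicate l.length l.headI) 0 (stepA true)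
    _]
  rw [show (List.replicate (1 : Nat) ["", "", ""] : List (List String)) = [["", "", ""]] from rfl]
  rw [run_same true l.headI l.length 0 [["", "", ""]]]
  rw [show (fun (cc : List (List String)) (ypa : Int) =>
      cc.modify ypa.toNat (fun row => row.set 1 (PySem.Int.toStr
        ((PySem.List.pyRange 0 (((List.replicate l.length l.headI).length : Int)) 1).foldl
          (fun c ypb => if PySem.List.pyGetD (PySem.List.pyGetD cc ypa ([] : List String)) 2 ""
              = PySem.Int.toStr (PySem.List.pyGetD (List.replicate l.length l.headI) ypb 0)
            then c + 1 else c) (0 : Int)))))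
    = cntBody (List.replicate l.length l.headI) (((List.replicate l.length l.headI).length : Int))
    from rfl]
  rw [show ((1 : Nat) : Int) = (([["", "", ""]] : List (List String)).length : Int) from by simp]
  rw [cnt0 (List.replicate l.length l.headI) _ [["", "", ""]]]
  rw [pvRuns_eq_rowsOf, hgrp]
  simp only [List.map_cons, List.map_nil, rowsOf]
  rw [show gRow (List.replicate l.length l.headI)
      (((List.replicate l.length l.headI).length : Int)) ["", "", ""]
    = ["", PySem.Int.toStr (cnt (List.replicate l.length l.headI)
        (((List.replicate l.length l.headI).length : Int)) ""), ""] from rfl]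
  rw [cnt_empty]
  intro h
  simp only [List.cons.injEq] at h
  exact toStr_ne_empty (0 + 1) h.1.1.symm

-- ===== VERDICT (by name: the statement is the Claim_ definition above) =====
theorem cad319492_spec : Claim_unchanged_cad319492 := by
  intro l _ hnD
  exact main_eq l hnD

theorem cad319492_changed : Claim_changed_cad319492 := by
  unfold Claim_changed_cad319492
  refine ⟨by decide, by decide, by decide, ?_, by decide⟩
  simp only [cad319492_alt, pvDiffWitness_cad319492, pvDiffWitnessOut_cad319492]
  rw [show PySem.List.sorted [(3:Int),3] (fun x => x) false = [3,3] from by decide]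
  rw [pvRuns.eq_def]; simp only []; rw [pvRuns.eq_def]
  decide

theorem cad319492_tight : Claim_exact_cad319492 := by
  intro l _ hD
  exact main_ne l hD
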